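-- pv_equiv track=rewrite | github.com/drshailesh88/emr | src/services/analytics/retention_tracker.py | _get_winback_action
-- ===== SOURCE A (Python) =====
-- from typing import List, Dict, Optional
--
-- def _get_winback_action(patient: Dict) -> str:
--     """Get recommended action for winning back a patient."""
--     conditions = patient.get('conditions', [])
--
--     if any('diabetes' in str(c).lower() for c in conditions):
--         return "Send reminder for diabetes monitoring (HbA1c due)"
--     elif any('hypertension' in str(c).lower() for c in conditions):
--         return "Send reminder for BP check"
--     else:
--         return "Send wellness check reminder"
-- ===== SOURCE B (Python) =====
-- _WINBACK_MESSAGES = [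
--     "Send reminder for diabetes monitoring (HbA1c due)",
--     "Send reminder for BP check",
--     "Send wellness check reminder",
-- ]
--
-- def _rank(c):
--     s = str(c).lower()
--     if 'diabetes' in s:
--         return 0
--     if 'hypertension' in s:
--         return 1
--     return 2
--
-- def _get_winback_action(patient):
--     """Get recommended action for winning back a patient."""
--     best = min((_rank(c) for c in patient.get('conditions', [])), default=2)
--     return _WINBACK_MESSAGES[best]
-- ===== Notes on version B (the rewrite author's own statement) =====
-- stated objective: alternative
-- what changed: Replaces the two keyword-specific any() scans and branch chain with a priority-rank scheme: each condition is classified to a numeric rank (0=diabetes, 1=hypertension, 2=other), the minimum rank is taken over the list, and the result indexes a message table.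
import Mathlib
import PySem

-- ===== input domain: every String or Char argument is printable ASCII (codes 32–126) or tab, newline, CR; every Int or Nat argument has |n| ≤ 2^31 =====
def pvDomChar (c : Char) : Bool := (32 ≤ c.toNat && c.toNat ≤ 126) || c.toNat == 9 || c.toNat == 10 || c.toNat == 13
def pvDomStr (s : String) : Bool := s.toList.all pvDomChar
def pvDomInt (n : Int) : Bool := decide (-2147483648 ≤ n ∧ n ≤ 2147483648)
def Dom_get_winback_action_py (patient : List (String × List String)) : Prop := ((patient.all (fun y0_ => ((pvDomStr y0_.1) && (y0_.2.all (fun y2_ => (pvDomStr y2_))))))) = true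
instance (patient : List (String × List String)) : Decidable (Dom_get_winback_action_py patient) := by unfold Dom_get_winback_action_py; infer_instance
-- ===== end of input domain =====

-- B replaces A's keyword-specific any() scans and branch chain by a priority-rank scheme:
-- classify each condition to a rank (0=diabetes, 1=hypertension, 2=other), take the minimum
-- rank over the list, and index a message table (alternative decomposition; same cost).

-- ===== PORT A =====
def get_winback_action_py (patient : List (String × List String)) : String :=
  let conditions := PySem.Dict.getD (PySem.Dict.mk patient) "conditions" []
  if conditions.any (fun c => PySem.Str.isIn "diabetes" (PySem.Str.lower c)) then
    "Send reminder for diabetes monitoring (HbA1c due)"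
  else if conditions.any (fun c => PySem.Str.isIn "hypertension" (PySem.Str.lower c)) then
    "Send reminder for BP check"
  else
    "Send wellness check reminder"

-- ===== PORT B =====
def winbackMessages : List String :=
  ["Send reminder for diabetes monitoring (HbA1c due)",
   "Send reminder for BP check",
   "Send wellness check reminder"]

def winbackRank (c : String) : Int :=
  let s := PySem.Str.lower c
  if PySem.Str.isIn "diabetes" s then 0
  else if PySem.Str.isIn "hypertension" s then 1
  else 2

def get_winback_action_py_alt (patient : List (String × List String)) : String :=
  let conditions := PySem.Dict.getD (PySem.Dict.mk patient) "conditions" []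
  let best := PySem.List.minD (conditions.map winbackRank) id 2
  -- messages[best]: best is always 0, 1 or 2, so the Python index never raises;
  -- the .getD "" default is never hit.
  (PySem.List.pyGet? winbackMessages best).getD ""

-- ===== PRECONDITION & SPEC =====
def Spec_get_winback_action_py (patient : List (String × List String)) (out : String) : Prop := out = get_winback_action_py_alt patient
instance (patient : List (String × List String)) (out : String) : Decidable (Spec_get_winback_action_py patient out) := by unfold Spec_get_winback_action_py; infer_instance

-- ===== CLAIM (what is proved, stated in full; the proofs are below) =====
def Claim_equal_get_winback_action_py : Prop := ∀ (patient : List (String × List String)), Dom_get_winback_action_py patient → Spec_get_winback_action_py patient (get_winback_action_py patient)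

-- ===== LEMMAS AND PROOFS =====

-- abbreviation used only in the proofs: the minimum rank A's branch chain selects
def winbackBest (l : List String) : Int :=
  if l.any (fun c => PySem.Str.isIn "diabetes" (PySem.Str.lower c)) then 0
  else if l.any (fun c => PySem.Str.isIn "hypertension" (PySem.Str.lower c)) then 1
  else 2

theorem winback_rank_min_aux (b1 b2 b3 b4 : Bool) :
    min (if b1 = true then (0 : Int) else if b2 = true then 1 else 2)
        (if b3 = true then (0 : Int) else if b4 = true then 1 else 2)
    = if (b1 || b3) = true then 0 else if (b2 || b4) = true then 1 else 2 := by
  cases b1 <;> cases b2 <;> cases b3 <;> cases b4 <;> decide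

theorem winback_rank_min (c : String) (l : List String) :
    min (winbackRank c) (winbackBest l) = winbackBest (c :: l) := by
  simp only [winbackRank, winbackBest, List.any_cons]
  exact winback_rank_min_aux _ _ _ _

theorem winbackRank_le (c : String) : winbackRank c ≤ 2 := by
  simp only [winbackRank]
  split_ifs <;> omega

theorem winback_foldl_min (f : Option Int → Int → Option Int)
    (hf : ∀ (m x : Int), f (some m) x = some (min x m))
    (l : List String) (m : Int) (hm : m ≤ 2) :
    List.foldl f (some m) (l.map winbackRank) = some (min m (winbackBest l)) := by
  induction l generalizing m with
  | nil =>
    simp only [List.map_nil, List.foldl_nil, winbackBest, List.any_nil]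
    simp
    omega
  | cons c cs ih =>
    simp only [List.map_cons, List.foldl_cons, hf]
    rw [ih _ (le_trans (min_le_left _ _) (winbackRank_le c))]
    rw [← winback_rank_min, min_comm (winbackRank c) m, min_assoc]

theorem winback_minD_eq (l : List String) :
    PySem.List.minD (l.map winbackRank) id 2 = winbackBest l := by
  cases l with
  | nil =>
    simp only [winbackBest, List.any_nil]
    simp [PySem.List.minD, PySem.List.min?]
  | cons c cs =>
    simp only [PySem.List.minD, PySem.List.min?, List.map_cons, List.foldl_cons]
    rw [winback_foldl_min _ (fun m x => by
          dsimp only [id_eq]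
          by_cases h : x < m
          · rw [if_pos h, min_eq_left h.le]
          · rw [if_neg h, min_eq_right (le_of_not_gt h)])
        cs (winbackRank c) (winbackRank_le c)]
    rw [winback_rank_min]
    simp

-- ===== VERDICT (by name: the statement is the Claim_ definition above) =====
theorem get_winback_action_py_spec : Claim_equal_get_winback_action_py := by
  intro patient _
  unfold Spec_get_winback_action_py get_winback_action_py get_winback_action_py_alt
  dsimp only
  rw [winback_minD_eq]
  unfold winbackBest
  by_cases h1 : (PySem.Dict.getD (PySem.Dict.mk patient) "conditions" []).any
      (fun c => PySem.Str.isIn "diabetes" (PySem.Str.lower c)) <;>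
    by_cases h2 : (PySem.Dict.getD (PySem.Dict.mk patient) "conditions" []).any
        (fun c => PySem.Str.isIn "hypertension" (PySem.Str.lower c)) <;>
      simp only [h1, h2, if_true] <;> rfl
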